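-- pv_equiv track=rewrite | github.com/ted622622/JARVIS | core/soul_growth.py | _trim_if_needed
-- ===== SOURCE A (Python) =====
-- _MAX_GROWTH_ENTRIES = 50
--
-- def _trim_if_needed(content: str) -> str:
--     """Keep only the most recent _MAX_GROWTH_ENTRIES entries."""
--     lines = content.split("\n")
--     header_lines = []
--     entry_lines = []
--
--     for line in lines:
--         if line.startswith("#") or line.startswith("<!--") or not line.strip():
--             if not entry_lines:
--                 header_lines.append(line)
--             else:
--                 entry_lines.append(line)
--         elif line.startswith("- "):
--             entry_lines.append(line)
--         else:
--             entry_lines.append(line)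
--
--     # Count actual entries (lines starting with "- ")
--     entries = [l for l in entry_lines if l.startswith("- ")]
--     if len(entries) <= _MAX_GROWTH_ENTRIES:
--         return content
--
--     # Keep only the last N entries
--     keep_count = _MAX_GROWTH_ENTRIES
--     kept = 0
--     result_entries = []
--     for line in reversed(entry_lines):
--         if line.startswith("- "):
--             if kept < keep_count:
--                 result_entries.append(line)
--                 kept += 1
--         else:
--             result_entries.append(line)
--
--     result_entries.reverse()
--     return "\n".join(header_lines + [""] + result_entries) + "\n"
-- ===== SOURCE B (Python) =====
-- _MAX_GROWTH_ENTRIES = 50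
--
-- def _trim_if_needed(content: str) -> str:
--     """Keep only the most recent _MAX_GROWTH_ENTRIES entries."""
--     lines = content.split("\n")
--     # header = maximal leading run of blank / '#' / '<!--' lines
--     h = 0
--     while h < len(lines) and (lines[h].startswith("#")
--                               or lines[h].startswith("<!--")
--                               or not lines[h].strip()):
--         h += 1
--     region = lines[h:]
--     # index table of entry lines in the region
--     positions = [i for i, l in enumerate(region) if l.startswith("- ")]
--     count = len(positions)
--     if count <= _MAX_GROWTH_ENTRIES:
--         return content
--     # first entry line to keep
--     threshold = positions[count - _MAX_GROWTH_ENTRIES]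
--     result = [l for i, l in enumerate(region)
--               if not (l.startswith("- ") and i < threshold)]
--     return "\n".join(lines[:h] + [""] + result) + "\n"
-- ===== Notes on version B (the rewrite author's own statement) =====
-- stated objective: alternative
-- what changed: Replaces A's two-list classification fold plus a reversed counting loop (append, count-up, re-reverse) by a header-prefix index scan, an explicit index table of entry-line positions, and a single forward filter against the threshold index of the first entry to keep.
import Mathlib
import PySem

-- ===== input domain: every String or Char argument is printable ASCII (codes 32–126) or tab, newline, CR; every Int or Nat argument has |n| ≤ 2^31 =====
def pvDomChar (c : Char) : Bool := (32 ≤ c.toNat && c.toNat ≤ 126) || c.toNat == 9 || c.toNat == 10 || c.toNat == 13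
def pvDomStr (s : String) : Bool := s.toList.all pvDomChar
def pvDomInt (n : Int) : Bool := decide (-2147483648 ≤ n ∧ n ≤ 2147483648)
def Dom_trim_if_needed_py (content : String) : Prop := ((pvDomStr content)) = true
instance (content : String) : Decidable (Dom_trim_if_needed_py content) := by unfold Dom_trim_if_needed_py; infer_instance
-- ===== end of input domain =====

-- B replaces A's two-list classification fold + reversed counting loop by a header-prefix
-- scan, an index table of entry-line positions and one forward threshold filter
-- (alternative decomposition, same asymptotic cost).

-- ===== PORT A =====
def pvHdr (l : String) : Bool :=
  PySem.Str.startswith l "#" || PySem.Str.startswith l "<!--" || (PySem.Str.strip l == "")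

def pvDash (l : String) : Bool := PySem.Str.startswith l "- "

-- A's classification loop body (header_lines, entry_lines)
def pvClassify (acc : List String × List String) (line : String) : List String × List String :=
  if pvHdr line then
    if acc.2.isEmpty then (acc.1 ++ [line], acc.2) else (acc.1, acc.2 ++ [line])
  else if pvDash line then (acc.1, acc.2 ++ [line])
  else (acc.1, acc.2 ++ [line])

-- A's reversed keep-loop body (result_entries, kept)
def pvStep (acc : List String × Nat) (line : String) : List String × Nat :=
  if pvDash line then
    if acc.2 < 50 then (acc.1 ++ [line], acc.2 + 1) else acc
  else (acc.1 ++ [line], acc.2)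

def trim_if_needed_py (content : String) : String :=
  let lines := (PySem.Str.split? content "\n").getD []   -- sep "\n" ≠ "": split? is always some
  let he := lines.foldl pvClassify ([], [])
  let entries := he.2.filter pvDash
  if entries.length ≤ 50 then content
  else
    let rk := he.2.reverse.foldl pvStep ([], 0)
    PySem.Str.join "\n" (he.1 ++ [""] ++ rk.1.reverse) ++ "\n"

-- ===== PORT B =====
-- B's while-loop counting the leading run of header-type lines
def pvCountHdr : List String → Nat
  | [] => 0
  | l :: ls => if pvHdr l then pvCountHdr ls + 1 else 0

-- B's filter condition 'not (l.startswith("- ") and i < threshold)'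
def pvKeepPred (t : Int) (p : Int × String) : Bool := !(pvDash p.2 && decide (p.1 < t))

def trim_if_needed_py_alt (content : String) : String :=
  let lines := (PySem.Str.split? content "\n").getD []   -- sep "\n" ≠ "": split? is always some
  let h := pvCountHdr lines
  let region := lines.drop h
  let positions := ((PySem.List.enumerate region 0).filter (fun p => pvDash p.2)).map (·.1)
  let count := positions.length
  if count ≤ 50 then content
  else
    let threshold := PySem.List.pyGetD positions ((count : Int) - 50) 0
    let result := ((PySem.List.enumerate region 0).filter (pvKeepPred threshold)).map (·.2)
    PySem.Str.join "\n" (lines.take h ++ [""] ++ result) ++ "\n"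

-- ===== PRECONDITION & SPEC =====
def Spec_trim_if_needed_py (content : String) (out : String) : Prop := out = trim_if_needed_py_alt content
instance (content : String) (out : String) : Decidable (Spec_trim_if_needed_py content out) := by unfold Spec_trim_if_needed_py; infer_instance

-- ===== CLAIM (what is proved, stated in full; the proofs are below) =====
def Claim_equal_trim_if_needed_py : Prop := ∀ (content : String), Dom_trim_if_needed_py content → Spec_trim_if_needed_py content (trim_if_needed_py content)

-- ===== LEMMAS AND PROOFS =====

-- number of entry lines
def pvCnt (xs : List String) : Nat := (xs.filter pvDash).length

-- keep the first j entry lines (and every non-entry line)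
def pvKeepF : List String → Nat → List String
  | [], _ => []
  | l :: ls, j =>
    if pvDash l then (if 0 < j then l :: pvKeepF ls (j - 1) else pvKeepF ls j)
    else l :: pvKeepF ls j

-- drop the first j entry lines (and keep every non-entry line)
def pvDropD : List String → Nat → List String
  | [], _ => []
  | l :: ls, j =>
    if pvDash l then (if 0 < j then pvDropD ls (j - 1) else l :: pvDropD ls j)
    else l :: pvDropD ls j

-- indices (from offset s) of the entry lines
def pvPos : List String → Int → List Int
  | [], _ => []
  | l :: ls, s => if pvDash l then s :: pvPos ls (s + 1) else pvPos ls (s + 1)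

-- forward threshold filter
def pvFB : List String → Int → Int → List String
  | [], _, _ => []
  | l :: ls, s, t =>
    if pvDash l ∧ s < t then pvFB ls (s + 1) t else l :: pvFB ls (s + 1) t

theorem pvClassify_ne (xs : List String) (h e : List String) (he : e ≠ []) :
    xs.foldl pvClassify (h, e) = (h, e ++ xs) := by
  induction xs generalizing e with
  | nil => simp
  | cons l ls ih =>
    have hstep : pvClassify (h, e) l = (h, e ++ [l]) := by
      by_cases hl : pvHdr l
      · simp [pvClassify, hl, List.isEmpty_iff, he]
      · by_cases hdl : pvDash l <;> simp [pvClassify, hl, hdl]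
    rw [List.foldl_cons, hstep, ih (e ++ [l]) (by simp)]
    simp

theorem pvClassify_loop (xs : List String) (h : List String) :
    xs.foldl pvClassify (h, []) = (h ++ xs.takeWhile pvHdr, xs.dropWhile pvHdr) := by
  induction xs generalizing h with
  | nil => simp
  | cons l ls ih =>
    by_cases hl : pvHdr l
    · have hstep : pvClassify (h, []) l = (h ++ [l], []) := by simp [pvClassify, hl]
      rw [List.foldl_cons, hstep, ih]
      simp [List.takeWhile_cons, List.dropWhile_cons, hl]
    · have hstep : pvClassify (h, []) l = (h, [l]) := by
        by_cases hdl : pvDash l <;> simp [pvClassify, hl, hdl]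
      rw [List.foldl_cons, hstep, pvClassify_ne ls h [l] (by simp)]
      simp [List.takeWhile_cons, List.dropWhile_cons, hl]

theorem pvStep_loop (xs : List String) (r : List String) (k : Nat) :
    (xs.foldl pvStep (r, k)).1 = r ++ pvKeepF xs (50 - k) := by
  induction xs generalizing r k with
  | nil => simp [pvKeepF]
  | cons l ls ih =>
    by_cases hd : pvDash l
    · by_cases hk : k < 50
      · have hstep : pvStep (r, k) l = (r ++ [l], k + 1) := by simp [pvStep, hd, hk]
        rw [List.foldl_cons, hstep, ih]
        have h1 : 0 < 50 - k := by omega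
        have h2 : 50 - (k + 1) = 50 - k - 1 := by omega
        simp [pvKeepF, hd, h1, h2]
      · have hstep : pvStep (r, k) l = (r, k) := by simp [pvStep, hd, hk]
        have h0 : 50 - k = 0 := by omega
        rw [List.foldl_cons, hstep, ih]
        simp [pvKeepF, hd, h0]
    · have hstep : pvStep (r, k) l = (r ++ [l], k) := by simp [pvStep, hd]
      rw [List.foldl_cons, hstep, ih]
      simp [pvKeepF, hd]

theorem pvCnt_cons (l : String) (ls : List String) :
    pvCnt (l :: ls) = (if pvDash l then 1 else 0) + pvCnt ls := by
  by_cases hd : pvDash l <;> simp [pvCnt, List.filter_cons, hd] <;> omega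

theorem pvKeepF_append (as bs : List String) (j : Nat) :
    pvKeepF (as ++ bs) j = pvKeepF as j ++ pvKeepF bs (j - pvCnt as) := by
  induction as generalizing j with
  | nil => simp [pvKeepF, pvCnt]
  | cons l ls ih =>
    by_cases hd : pvDash l
    · by_cases hj : 0 < j
      · have heq : j - 1 - pvCnt ls = j - pvCnt (l :: ls) := by rw [pvCnt_cons]; simp [hd]; omega
        simp [pvKeepF, hd, hj, ih, heq]
      · have h0 : j = 0 := by omega
        have heq : (0:Nat) - pvCnt ls = 0 - pvCnt (l :: ls) := by simp
        simp [pvKeepF, hd, h0, ih]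
    · have heq : j - pvCnt ls = j - pvCnt (l :: ls) := by rw [pvCnt_cons]; simp [hd]
      simp [pvKeepF, hd, ih, heq]

theorem pvCnt_reverse (xs : List String) : pvCnt xs.reverse = pvCnt xs := by
  simp [pvCnt, List.filter_reverse]

theorem pvRev_keepF (xs : List String) (j : Nat) :
    (pvKeepF xs.reverse j).reverse = pvDropD xs (pvCnt xs - j) := by
  induction xs generalizing j with
  | nil => simp [pvKeepF, pvDropD]
  | cons l ls ih =>
    have happ : pvKeepF (ls.reverse ++ [l]) j
        = pvKeepF ls.reverse j ++ pvKeepF [l] (j - pvCnt ls) := by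
      rw [pvKeepF_append, pvCnt_reverse]
    by_cases hd : pvDash l
    · by_cases hj : pvCnt ls < j
      · have h1 : 0 < j - pvCnt ls := by omega
        have h2 : pvCnt (l :: ls) - j = 0 := by rw [pvCnt_cons]; simp [hd]; omega
        have h3 : pvCnt ls - j = 0 := by omega
        simp [List.reverse_cons, happ, pvKeepF, hd, h1, ih, pvDropD, h2, h3]
      · have h1 : ¬ 0 < j - pvCnt ls := by omega
        have h2 : 0 < pvCnt (l :: ls) - j := by rw [pvCnt_cons]; simp [hd]; omega
        have h3 : pvCnt (l :: ls) - j - 1 = pvCnt ls - j := by rw [pvCnt_cons]; simp [hd]; omega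
        simp [List.reverse_cons, happ, pvKeepF, hd, h1, ih, pvDropD, h2, h3]
    · have h2 : pvCnt (l :: ls) - j = pvCnt ls - j := by rw [pvCnt_cons]; simp [hd]
      simp [List.reverse_cons, happ, pvKeepF, hd, ih, pvDropD, h2]

theorem pvCountHdr_take (xs : List String) : xs.take (pvCountHdr xs) = xs.takeWhile pvHdr := by
  induction xs with
  | nil => simp
  | cons l ls ih =>
    by_cases hl : pvHdr l <;> simp [pvCountHdr, hl, List.takeWhile_cons, ih]

theorem pvCountHdr_drop (xs : List String) : xs.drop (pvCountHdr xs) = xs.dropWhile pvHdr := by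
  induction xs with
  | nil => simp
  | cons l ls ih =>
    by_cases hl : pvHdr l <;> simp [pvCountHdr, hl, List.dropWhile_cons, ih]

theorem pvEnum_pos (xs : List String) (s : Int) :
    ((PySem.List.enumerate xs s).filter (fun p => pvDash p.2)).map (·.1) = pvPos xs s := by
  induction xs generalizing s with
  | nil => simp [pvPos]
  | cons l ls ih =>
    by_cases hd : pvDash l <;>
      simp [PySem.List.enumerate_cons, List.filter_cons, hd, pvPos, ih]

theorem pvEnum_fb (xs : List String) (s t : Int) :
    ((PySem.List.enumerate xs s).filter (pvKeepPred t)).map (·.2) = pvFB xs s t := by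
  induction xs generalizing s with
  | nil => simp [pvFB]
  | cons l ls ih =>
    rw [PySem.List.enumerate_cons, List.filter_cons]
    by_cases hc : pvDash l ∧ s < t
    · have hp : pvKeepPred t (s, l) = false := by simp [pvKeepPred, hc.1, hc.2]
      rw [hp]
      simp only [Bool.false_eq_true, if_false]
      rw [ih]
      simp only [pvFB]
      rw [if_pos hc]
    · have hp : pvKeepPred t (s, l) = true := by
        rcases Decidable.not_and_iff_not_or_not.mp hc with hna | hna <;> simp [pvKeepPred, hna]
      rw [hp, if_pos rfl, List.map_cons, ih]
      simp only [pvFB]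
      rw [if_neg hc]

theorem pvPos_length (xs : List String) (s : Int) : (pvPos xs s).length = pvCnt xs := by
  induction xs generalizing s with
  | nil => simp [pvPos, pvCnt]
  | cons l ls ih =>
    by_cases hd : pvDash l <;> simp [pvPos, hd, pvCnt_cons, ih] <;> omega

theorem pvPos_ge (xs : List String) (s : Int) (x : Int) (hx : x ∈ pvPos xs s) : s ≤ x := by
  induction xs generalizing s with
  | nil => simp [pvPos] at hx
  | cons l ls ih =>
    by_cases hd : pvDash l
    · simp [pvPos, hd] at hx
      rcases hx with rfl | hx
      · omega
      · have := ih (s + 1) hx; omega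
    · simp [pvPos, hd] at hx
      have := ih (s + 1) hx; omega

theorem pvPos_take (xs : List String) (s : Int) (d : Nat)
    (hd : d < (pvPos xs s).length) :
    pvCnt (xs.take (((pvPos xs s).getD d 0 - s).toNat)) = d := by
  induction xs generalizing s d with
  | nil => simp [pvPos] at hd
  | cons l ls ih =>
    by_cases hl : pvDash l
    · have hpos : pvPos (l :: ls) s = s :: pvPos ls (s + 1) := by
        simp only [pvPos]; rw [if_pos hl]
      rw [hpos] at hd ⊢
      match d with
      | 0 => simp [pvCnt]
      | e + 1 =>
        simp only [List.length_cons] at hd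
        have he : e < (pvPos ls (s + 1)).length := by omega
        have hmem : (pvPos ls (s + 1)).getD e 0 ∈ pvPos ls (s + 1) := by
          rw [List.getD_eq_getElem _ _ he]; exact List.getElem_mem he
        have hge : s + 1 ≤ (pvPos ls (s + 1)).getD e 0 := pvPos_ge _ _ _ hmem
        rw [List.getD_cons_succ]
        have ht : ((pvPos ls (s+1)).getD e 0 - s).toNat
            = ((pvPos ls (s+1)).getD e 0 - (s+1)).toNat + 1 := by omega
        rw [ht, List.take_succ_cons, pvCnt_cons, if_pos hl, ih (s + 1) e he]
        omega
    · have hpos : pvPos (l :: ls) s = pvPos ls (s + 1) := by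
        simp only [pvPos]; rw [if_neg hl]
      rw [hpos] at hd ⊢
      have hmem : (pvPos ls (s + 1)).getD d 0 ∈ pvPos ls (s + 1) := by
        rw [List.getD_eq_getElem _ _ hd]; exact List.getElem_mem hd
      have hge : s + 1 ≤ (pvPos ls (s + 1)).getD d 0 := pvPos_ge _ _ _ hmem
      have ht : ((pvPos ls (s+1)).getD d 0 - s).toNat
          = ((pvPos ls (s+1)).getD d 0 - (s+1)).toNat + 1 := by omega
      rw [ht, List.take_succ_cons, pvCnt_cons, if_neg hl, ih (s + 1) d hd]
      omega

theorem pvFB_dropD (xs : List String) (s t : Int) :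
    pvFB xs s t = pvDropD xs (pvCnt (xs.take ((t - s).toNat))) := by
  induction xs generalizing s with
  | nil => simp [pvFB, pvDropD]
  | cons l ls ih =>
    by_cases hst : s < t
    · have htake : (l :: ls).take ((t - s).toNat)
          = l :: ls.take ((t - (s + 1)).toNat) := by
        have h1 : (t - s).toNat = (t - (s + 1)).toNat + 1 := by omega
        rw [h1, List.take_succ_cons]
      by_cases hl : pvDash l
      · have hpos : 0 < pvCnt ((l :: ls).take ((t - s).toNat)) := by
          rw [htake, pvCnt_cons]; simp [hl]
        have hsub : pvCnt ((l :: ls).take ((t - s).toNat)) - 1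
            = pvCnt (ls.take ((t - (s + 1)).toNat)) := by
          rw [htake, pvCnt_cons]; simp [hl]
        simp only [pvFB, pvDropD]
        rw [if_pos ⟨hl, hst⟩, if_pos hl, if_pos hpos, hsub, ih]
      · have hsub : pvCnt ((l :: ls).take ((t - s).toNat))
            = pvCnt (ls.take ((t - (s + 1)).toNat)) := by
          rw [htake, pvCnt_cons]; simp [hl]
        simp only [pvFB, pvDropD]
        rw [if_neg (by tauto), if_neg (by simp [hl]), hsub, ih]
    · have h0 : (t - s).toNat = 0 := by omega
      have h1 : (t - (s + 1)).toNat = 0 := by omega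
      simp only [pvFB]
      rw [if_neg (by tauto), ih, h0, h1]
      simp only [List.take_zero]
      have hc0 : pvCnt ([] : List String) = 0 := by simp [pvCnt]
      rw [hc0]
      by_cases hl : pvDash l <;> simp [pvDropD, hl]

-- ===== VERDICT (by name: the statement is the Claim_ definition above) =====
theorem trim_if_needed_py_spec : Claim_equal_trim_if_needed_py := by
  intro content _
  unfold Spec_trim_if_needed_py trim_if_needed_py trim_if_needed_py_alt
  simp only [pvClassify_loop, List.nil_append, pvCountHdr_take, pvCountHdr_drop, pvEnum_pos,
    pvPos_length]
  set e := ((PySem.Str.split? content "\n").getD []).dropWhile pvHdr with hedef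
  have hlen : (e.filter pvDash).length = pvCnt e := rfl
  rw [hlen]
  by_cases hc : pvCnt e ≤ 50
  · rw [if_pos hc, if_pos hc]
  · rw [if_neg hc, if_neg hc]
    have hdlt : pvCnt e - 50 < (pvPos e 0).length := by rw [pvPos_length]; omega
    have hcast : ((pvCnt e : Int) - 50) = ((pvCnt e - 50 : Nat) : Int) := by omega
    rw [pvStep_loop, hcast, PySem.List.pyGetD_natCast, pvEnum_fb, pvFB_dropD]
    simp only [List.nil_append, Nat.sub_zero, Int.sub_zero]
    rw [pvRev_keepF]
    have hpt := pvPos_take e 0 (pvCnt e - 50) hdlt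
    simp only [Int.sub_zero] at hpt
    rw [hpt]
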